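-- pv_equiv track=rewrite | github.com/pypi-data/pypi-mirror-403 | packages/brickedit/brickedit-5.0.0-py3-none-any.whl/brickedit/brm.py | encode_author
-- ===== SOURCE A (Python) =====
-- _ENCODE_2DIGITS = tuple((i % 10) | ((i // 10) << 4) for i in range(100))
--
-- def encode_author(author: int) -> int:
--     result = 0
--     shift = 0
--     while author:
--         author, byte_value = divmod(author, 100)
--         result |= _ENCODE_2DIGITS[byte_value] << shift
--         shift += 8
--     return result
-- ===== SOURCE B (Python) =====
-- def encode_author(author: int) -> int:
--     # Pre_ excludes negative authors: A's while-loop never terminates there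
--     # (divmod floors toward -inf), and this version raises ValueError on the '-' sign.
--     result = 0
--     for i, ch in enumerate(reversed(str(author))):
--         result |= int(ch) << (4 * i)
--     return result
-- ===== Notes on version B (the rewrite author's own statement) =====
-- stated objective: simpler
-- what changed: Replaces the two-digit divmod loop with its precomputed nibble table by a single pass over the decimal string representation, packing int(ch) of each character into its nibble position.
import Mathlib
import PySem

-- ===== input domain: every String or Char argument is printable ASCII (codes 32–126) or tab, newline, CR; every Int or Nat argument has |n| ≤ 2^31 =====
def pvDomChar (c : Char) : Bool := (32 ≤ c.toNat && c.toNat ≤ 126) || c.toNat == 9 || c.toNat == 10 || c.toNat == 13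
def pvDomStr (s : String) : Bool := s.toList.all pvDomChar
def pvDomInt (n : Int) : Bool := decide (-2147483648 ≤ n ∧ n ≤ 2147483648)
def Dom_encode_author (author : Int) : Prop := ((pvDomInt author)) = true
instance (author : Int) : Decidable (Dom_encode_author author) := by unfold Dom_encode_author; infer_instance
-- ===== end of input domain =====

-- B packs the decimal-string characters one nibble at a time instead of A's
-- two-digit divmod loop with a precomputed table; same cost, simpler.

-- ===== PORT A =====
-- the value _ENCODE_2DIGITS[i] (the tuple precomputes this value for each index;
-- evaluating it at the looked-up index is value-identical)
def encode2Digits (i : Nat) : Int :=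
  PySem.Int.bor ((i % 10 : Nat) : Int) (((i / 10 : Nat) : Int) <<< (4 : Nat))

-- the while-loop of A; for author < 0 the Python loop never terminates (divmod floors
-- toward -inf, so author stays -1), those inputs are outside Pre_; on the admitted
-- nonnegative inputs the loop variable is a Nat and divmod(author,100) is (/100, %100)
def encLoopA (author : Nat) (result : Int) (shift : Nat) : Int :=
  if author = 0 then result
  else encLoopA (author / 100)
        (PySem.Int.bor result (encode2Digits (author % 100) <<< shift)) (shift + 8)
  termination_by author
  decreasing_by exact Nat.div_lt_self (Nat.pos_of_ne_zero (by assumption)) (by norm_num)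

def encode_author (author : Int) : Int := encLoopA author.toNat 0 0

-- ===== PORT B =====
-- int(ch); under Pre_ every traversed character is a decimal digit, so the none
-- (ValueError) arm is unreachable
def pyIntOfDigitChar (c : Char) : Int := (PySem.Int.ofStr? (String.mk [c])).getD 0

def encode_author_alt (author : Int) : Int :=
  (PySem.List.enumerate ((PySem.Int.toStr author).toList.reverse) 0).foldl
    (fun result p => PySem.Int.bor result (pyIntOfDigitChar p.2 <<< (4 * p.1).toNat)) 0

-- ===== PRECONDITION & SPEC =====
-- Pre_ excludes negative authors: there Python A never returns (the while-loop
-- diverges, since divmod floors toward -inf), so A returns on exactly these inputs.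
def Pre_encode_author (author : Int) : Prop := 0 ≤ author
instance (author : Int) : Decidable (Pre_encode_author author) := by
  unfold Pre_encode_author; infer_instance

def pvWitness_encode_author : Int := 1234

def Spec_encode_author (author : Int) (out : Int) : Prop := out = encode_author_alt author
instance (author : Int) (out : Int) : Decidable (Spec_encode_author author out) := by
  unfold Spec_encode_author; infer_instance

-- ===== CLAIM (what is proved, stated in full; the proofs are below) =====
def Claim_equal_encode_author : Prop :=
  ∀ (author : Int), Dom_encode_author author → Pre_encode_author author →
    Spec_encode_author author (encode_author author)

-- ===== LEMMAS AND PROOFS =====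

-- cast bridge for `(m : Int) <<< (k : Nat)`
theorem natCast_shl (m k : Nat) : ((m : Int) <<< k) = ((m <<< k : Nat) : Int) := by
  rw [← Int.shiftLeft_natCast_right, Int.shiftLeft_natCast]

-- Python `r | (d << k)` on nonnegative values with r below the shift is addition
theorem bor_shl_eq_add (r d k : Nat) (h : r < 2 ^ k) :
    PySem.Int.bor (r : Int) ((d : Int) <<< k) = ((d <<< k + r : Nat) : Int) := by
  rw [natCast_shl]
  simp only [PySem.Int.bor_natCast]
  rw [Nat.shiftLeft_add_eq_or_of_lt h, Nat.lor_comm]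

-- the same with the shift amount coerced to Int
theorem bor_shl_eq_add' (r d k : Nat) (h : r < 2 ^ k) :
    PySem.Int.bor (r : Int) ((d : Int) <<< ((k : Nat) : Int)) = ((d <<< k + r : Nat) : Int) := by
  rw [Int.shiftLeft_natCast]
  simp only [PySem.Int.bor_natCast]
  rw [Nat.shiftLeft_add_eq_or_of_lt h, Nat.lor_comm]

-- the table entry, arithmetically
theorem encode2Digits_eq (b : Nat) :
    encode2Digits b = ((b / 10 * 16 + b % 10 : Nat) : Int) := by
  unfold encode2Digits
  rw [bor_shl_eq_add _ _ _ (by omega : b % 10 < 2 ^ 4)]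
  norm_num [Nat.shiftLeft_eq]

-- base-16 repack of the decimal digits: the common specification of both programs
def nibbleSpec (n : Nat) : Nat := Nat.ofDigits 16 (Nat.digits 10 n)

theorem nibbleSpec_zero : nibbleSpec 0 = 0 := by simp [nibbleSpec]

theorem nibbleSpec_step (n : Nat) (hn : 0 < n) :
    nibbleSpec n = n % 10 + 16 * (n / 10 % 10) + 256 * nibbleSpec (n / 100) := by
  unfold nibbleSpec
  rw [Nat.digits_def' (by norm_num : 1 < 10) hn]
  by_cases h : n / 10 = 0
  · simp [h, Nat.ofDigits_cons, show n / 100 = 0 by omega]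
  · rw [Nat.digits_def' (by norm_num : 1 < 10) (Nat.pos_of_ne_zero h)]
    simp only [Nat.ofDigits_cons]
    have : n / 10 / 10 = n / 100 := by omega
    rw [this]; ring

-- A's loop computes nibbleSpec shifted into place
theorem encLoopA_spec (n : Nat) : ∀ (r s : Nat), r < 2 ^ s →
    encLoopA n (r : Int) s = ((r + nibbleSpec n * 2 ^ s : Nat) : Int) := by
  induction n using Nat.strong_induction_on with
  | _ n ih =>
    intro r s hr
    rw [encLoopA]
    by_cases h0 : n = 0
    · simp [h0, nibbleSpec_zero]
    · simp only [h0, if_false]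
      rw [encode2Digits_eq, natCast_shl]
      rw [show PySem.Int.bor (r : Int) = PySem.Int.bor ((r : Nat) : Int) from rfl]
      simp only [PySem.Int.bor_natCast]
      have htlt : n % 100 / 10 * 16 + n % 100 % 10 < 256 := by omega
      rw [Nat.lor_comm, ← Nat.shiftLeft_add_eq_or_of_lt hr]
      have hbound : (n % 100 / 10 * 16 + n % 100 % 10) <<< s + r < 2 ^ (s + 8) := by
        rw [Nat.shiftLeft_eq, pow_add]
        calc (n % 100 / 10 * 16 + n % 100 % 10) * 2 ^ s + r
            < (n % 100 / 10 * 16 + n % 100 % 10) * 2 ^ s + 2 ^ s := by omega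
          _ ≤ 256 * 2 ^ s := by nlinarith [pow_pos (show 0 < 2 by norm_num) s]
          _ = 2 ^ s * 2 ^ 8 := by ring
      rw [ih (n / 100) (Nat.div_lt_self (Nat.pos_of_ne_zero h0) (by norm_num)) _ _ hbound]
      congr 1
      rw [nibbleSpec_step n (Nat.pos_of_ne_zero h0)]
      rw [Nat.shiftLeft_eq, pow_add]
      have h1 : n % 100 % 10 = n % 10 := by omega
      have h2 : n % 100 / 10 = n / 10 % 10 := by omega
      rw [h1, h2]; ring

-- Nat.toDigits with enough fuel is the reversed digit-character list
theorem toDigitsCore_eq_digits (f : Nat) : ∀ (n : Nat) (l : List Char), 0 < n → n < 10 ^ f →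
    Nat.toDigitsCore 10 f n l = ((Nat.digits 10 n).map Nat.digitChar).reverse ++ l := by
  induction f with
  | zero => intro n l h1 h2; omega
  | succ f ih =>
    intro n l h1 h2
    rw [Nat.toDigitsCore]
    rw [Nat.digits_def' (by norm_num : 1 < 10) h1]
    by_cases h : n / 10 = 0
    · rw [h]; simp
    · rw [if_neg h]
      rw [ih (n / 10) _ (Nat.pos_of_ne_zero h) (by omega)]
      simp

theorem toDigits_eq_digits (n : Nat) (hn : 0 < n) :
    Nat.toDigits 10 n = ((Nat.digits 10 n).map Nat.digitChar).reverse := by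
  have hf : n < 10 ^ (n + 1) := by
    calc n < 2 ^ n := Nat.lt_two_pow_self
      _ ≤ 10 ^ n := Nat.pow_le_pow_left (by norm_num) n
      _ ≤ 10 ^ (n + 1) := Nat.pow_le_pow_right (by norm_num) (Nat.le_succ n)
  rw [Nat.toDigits, toDigitsCore_eq_digits (n + 1) n [] hn hf]
  simp

-- int(ch) of a decimal digit character
theorem pyIntOfDigitChar_digitChar (d : Nat) (hd : d < 10) :
    pyIntOfDigitChar (Nat.digitChar d) = (d : Int) := by
  interval_cases d <;> decide

-- B's fold over the little-endian digit characters
theorem foldB_spec (ds : List Nat) : ∀ (i r : Nat), (∀ d ∈ ds, d < 10) → r < 16 ^ i →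
    (PySem.List.enumerate (ds.map Nat.digitChar) ((i : Nat) : Int)).foldl
      (fun result p => PySem.Int.bor result (pyIntOfDigitChar p.2 <<< (4 * p.1).toNat))
      ((r : Nat) : Int)
    = ((r + Nat.ofDigits 16 ds * 16 ^ i : Nat) : Int) := by
  induction ds with
  | nil => intro i r _ _; simp [PySem.List.enumerate_nil, Nat.ofDigits_nil]
  | cons d ds ih =>
    intro i r hds hr
    rw [List.map_cons, PySem.List.enumerate_cons, List.foldl_cons]
    have hd : d < 10 := hds d (List.mem_cons_self)
    rw [pyIntOfDigitChar_digitChar d hd]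
    have hsh : ((4 * (i : Int)).toNat) = 4 * i := by omega
    rw [hsh]
    have h16 : (16 : Nat) ^ i = 2 ^ (4 * i) := by rw [pow_mul]; norm_num
    rw [bor_shl_eq_add' r d (4 * i) (by omega)]
    have hcast : ((i : Int) + 1) = (((i + 1 : Nat) : Nat) : Int) := by push_cast; ring
    rw [hcast]
    have hbound : d <<< (4 * i) + r < 16 ^ (i + 1) := by
      rw [Nat.shiftLeft_eq, ← h16, pow_succ]
      nlinarith [pow_pos (show 0 < 16 by norm_num) i]
    rw [ih (i + 1) _ (fun x hx => hds x (List.mem_cons_of_mem d hx)) hbound]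
    congr 1
    rw [Nat.ofDigits_cons, Nat.shiftLeft_eq, ← h16, pow_succ]
    ring

-- B on a nonnegative author computes nibbleSpec too
theorem encode_author_alt_eq (author : Int) (h : 0 ≤ author) :
    encode_author_alt author = ((nibbleSpec author.toNat : Nat) : Int) := by
  unfold encode_author_alt
  have hchars : (PySem.Int.toStr author).toList = PySem.Int.toChars author :=
    PySem.Int.toList_toStr author
  rw [hchars]
  unfold PySem.Int.toChars
  rw [if_neg (by omega)]
  by_cases h0 : author.toNat = 0
  · rw [h0]; decide
  · rw [toDigits_eq_digits author.toNat (Nat.pos_of_ne_zero h0), List.reverse_reverse]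
    have := foldB_spec (Nat.digits 10 author.toNat) 0 0
      (fun d hd => Nat.digits_lt_base (by norm_num) hd) (by norm_num)
    simpa [nibbleSpec] using this

-- ===== VERDICT (by name: the statement is the Claim_ definition above) =====
theorem encode_author_spec : Claim_equal_encode_author := by
  intro author _ hpre
  unfold Spec_encode_author
  unfold encode_author
  rw [show (0 : Int) = ((0 : Nat) : Int) from rfl,
    encLoopA_spec author.toNat 0 0 (by norm_num),
    encode_author_alt_eq author hpre]
  simp
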